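-- pv_equiv track=rewrite | github.com/WIPACrepo/lta | jadetools/Utils.py | ParseCleanDirName
-- ===== SOURCE A (Python) =====
-- def ParseCleanDirName(bname):
--     ''' Strip off trailing / and duplicate // in a directory name
--         This works even if this is not a rooted directory, but a chunk '''
--     #+
--     # Arguments:        directory (or fragment) name: not a file!
--     # Returns:          Directory name without extra /
--     # Side Effects:     None
--     # Relies on:        Nothing
--     #-
--     chunks = bname.split('/')
--     if len(chunks) == 1:
--         return bname
--     basen = chunks[0]
--     for word in chunks[1:]:
--         if word != '':
--             basen = basen + '/' + word
--     return basen
-- ===== SOURCE B (Python) =====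
-- def ParseCleanDirName(bname):
--     ''' Strip off trailing / and duplicate // in a directory name '''
--     # One pass over the characters: emit a '/' only when the previous
--     # emitted character was not '/', then drop trailing slashes.
--     out = []
--     prev_slash = False
--     for ch in bname:
--         if ch == '/':
--             if not prev_slash:
--                 out.append(ch)
--             prev_slash = True
--         else:
--             out.append(ch)
--             prev_slash = False
--     while out and out[-1] == '/':
--         out.pop()
--     return ''.join(out)
-- ===== Notes on version B (the rewrite author's own statement) =====
-- stated objective: alternative
-- what changed: A splits the name on the slash character and rebuilds it chunk by chunk; B makes a single character-level pass that emits a slash only when the previously emitted character was not a slash, then pops trailing slashes.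
import Mathlib
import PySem

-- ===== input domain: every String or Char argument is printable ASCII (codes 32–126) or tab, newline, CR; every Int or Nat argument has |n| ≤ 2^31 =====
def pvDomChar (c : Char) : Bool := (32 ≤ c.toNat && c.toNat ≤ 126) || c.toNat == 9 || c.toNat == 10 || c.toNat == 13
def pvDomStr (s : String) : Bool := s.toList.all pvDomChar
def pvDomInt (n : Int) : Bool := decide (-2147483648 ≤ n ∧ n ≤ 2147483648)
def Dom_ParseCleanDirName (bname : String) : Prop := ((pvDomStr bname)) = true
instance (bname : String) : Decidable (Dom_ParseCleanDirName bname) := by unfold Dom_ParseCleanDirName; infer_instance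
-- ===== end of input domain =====

-- B replaces A's split-on-'/'-and-rebuild with a single character scan that collapses
-- duplicate slashes as it goes, then pops trailing slashes (objective: alternative).


-- ===== PORT A =====
def ParseCleanDirName (bname : String) : String :=
  let chunks := PySem.Chars.splitOn bname.toList ['/']
  if chunks.length == 1 then bname
  else
    let basen := chunks.headD []   -- chunks[0]; split never returns an empty list
    String.ofList (chunks.tail.foldl
      (fun basen word => if word ≠ [] then basen ++ ['/'] ++ word else basen) basen)

-- ===== PORT B =====
-- loop body of B: emit ch unless it is a '/' right after an emitted '/'
def pvStep (st : List Char × Bool) (ch : Char) : List Char × Bool :=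
  if ch = '/' then (if st.2 then st.1 else st.1 ++ ['/'], true)
  else (st.1 ++ [ch], false)

-- B's trailing 'while out and out[-1] == "/": out.pop()'
def pvPop (out : List Char) : List Char :=
  if h : out.getLast? = some '/' then pvPop out.dropLast else out
termination_by out.length
decreasing_by
  have hne : out ≠ [] := by intro hn; subst hn; simp at h
  have := List.length_pos_iff.mpr hne
  simp [List.length_dropLast]
  omega

def ParseCleanDirName_alt (bname : String) : String :=
  let st := bname.toList.foldl pvStep ([], false)
  String.ofList (pvPop st.1)

-- ===== PRECONDITION & SPEC =====
def Spec_ParseCleanDirName (bname : String) (out : String) : Prop := out = ParseCleanDirName_alt bname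
instance (bname : String) (out : String) : Decidable (Spec_ParseCleanDirName bname out) := by unfold Spec_ParseCleanDirName; infer_instance

-- ===== CLAIM (what is proved, stated in full; the proofs are below) =====
def Claim_equal_ParseCleanDirName : Prop := ∀ (bname : String), Dom_ParseCleanDirName bname → Spec_ParseCleanDirName bname (ParseCleanDirName bname)

-- ===== LEMMAS AND PROOFS =====

-- proof-only model of split('/'): chunks of l with the pending prefix pref
def pvMySplit : List Char → List Char → List (List Char)
  | pref, [] => [pref]
  | pref, c :: t => if c = '/' then pref :: pvMySplit [] t else pvMySplit (pref ++ [c]) t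

-- what A's rebuild loop appends for the tail chunks
def pvForm2 (chunks : List (List Char)) : List Char :=
  chunks.flatMap (fun w => if w = [] then [] else '/' :: w)

-- A's full result on a chunk list
def pvForm (chunks : List (List Char)) : List Char := chunks.headD [] ++ pvForm2 chunks.tail

-- head-recursive model of B's scan from state ps
def pvCollapse : Bool → List Char → List Char
  | _, [] => []
  | ps, c :: t =>
    if c = '/' then (if ps then pvCollapse true t else '/' :: pvCollapse true t)
    else c :: pvCollapse false t

theorem pvGo_eq (l : List Char) : ∀ (fuel : Nat) (cur : List Char) (acc : List (List Char)),
    l.length ≤ fuel →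
    PySem.Chars.splitOn.go ['/'] fuel l cur acc = acc.reverse ++ pvMySplit cur.reverse l := by
  induction l with
  | nil =>
    intro fuel cur acc _
    cases fuel <;> simp [PySem.Chars.splitOn.go, pvMySplit]
  | cons c t ih =>
    intro fuel cur acc h
    cases fuel with
    | zero => simp at h
    | succ f =>
      by_cases hc : c = '/'
      · subst hc
        rw [PySem.Chars.splitOn.go]
        simp only [List.isPrefixOf, List.length_cons] at *
        simp [ih f [] (cur.reverse :: acc) (by omega), pvMySplit]
      · rw [PySem.Chars.splitOn.go]
        simp only [List.length_cons] at h
        simp [List.isPrefixOf, hc, ih f (c :: cur) acc (by omega), pvMySplit]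
        exact fun h' => absurd h'.symm hc

theorem pvSplitOn_eq (l : List Char) : PySem.Chars.splitOn l ['/'] = pvMySplit [] l := by
  simpa using pvGo_eq l (l.length + 1) [] [] (by omega)

theorem pvMySplit_head (l : List Char) : ∀ pref, ∃ q rest, pvMySplit pref l = (pref ++ q) :: rest := by
  induction l with
  | nil => intro pref; exact ⟨[], [], by simp [pvMySplit]⟩
  | cons c t ih =>
    intro pref
    by_cases hc : c = '/'
    · exact ⟨[], pvMySplit [] t, by simp [pvMySplit, hc]⟩
    · obtain ⟨q, rest, hq⟩ := ih (pref ++ [c])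
      exact ⟨c :: q, rest, by simp [pvMySplit, hc, hq]⟩

theorem pvMySplit_len1 (l : List Char) : ∀ pref,
    (pvMySplit pref l).length = 1 → pvMySplit pref l = [pref ++ l] := by
  induction l with
  | nil => intro pref _; simp [pvMySplit]
  | cons c t ih =>
    intro pref h
    by_cases hc : c = '/'
    · obtain ⟨q, rest, hq⟩ := pvMySplit_head t []
      rw [pvMySplit, if_pos hc, hq] at h
      simp at h
    · rw [pvMySplit, if_neg hc] at h ⊢
      rw [ih (pref ++ [c]) h]
      simp

theorem pvFoldl_collapse (t : List Char) : ∀ (out : List Char) (ps : Bool),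
    (t.foldl pvStep (out, ps)).1 = out ++ pvCollapse ps t := by
  induction t with
  | nil => intro out ps; simp [pvCollapse]
  | cons c t ih =>
    intro out ps
    by_cases hc : c = '/'
    · cases ps <;> simp [pvStep, pvCollapse, hc, ih]
    · simp [pvStep, pvCollapse, hc, ih]

theorem pvPop_no_slash (u : List Char) (h : u.getLast? ≠ some '/') : pvPop u = u := by
  rw [pvPop]; simp [h]

theorem pvPop_append_slash (u : List Char) : pvPop (u ++ ['/']) = pvPop u := by
  rw [pvPop]; simp

theorem pvGood_append (v : List Char) (c : Char) (hc : c ≠ '/') :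
    (v ++ [c]).getLast? ≠ some '/' := by
  simp [hc]

theorem pvMaster (t : List Char) :
    (∀ u : List Char, u.getLast? ≠ some '/' →
      pvPop (u ++ '/' :: pvCollapse true t) = u ++ pvForm2 (pvMySplit [] t)) ∧
    (∀ pref u : List Char, '/' ∉ pref → (u ++ pref).getLast? ≠ some '/' →
      pvPop (u ++ pref ++ pvCollapse false t) = u ++ pvForm (pvMySplit pref t)) := by
  induction t with
  | nil =>
    constructor
    · intro u hu
      have : u ++ '/' :: pvCollapse true [] = u ++ ['/'] := by simp [pvCollapse]
      rw [this, pvPop_append_slash, pvPop_no_slash u hu]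
      simp [pvMySplit, pvForm2]
    · intro pref u _ hg
      have : u ++ pref ++ pvCollapse false [] = u ++ pref := by simp [pvCollapse]
      rw [this, pvPop_no_slash _ hg]
      simp [pvMySplit, pvForm, pvForm2]
  | cons c t ih =>
    constructor
    · intro u hu
      by_cases hc : c = '/'
      · subst hc
        rw [show pvCollapse true ('/' :: t) = pvCollapse true t by simp [pvCollapse]]
        rw [ih.1 u hu]
        simp [pvMySplit, pvForm2]
      · rw [show pvCollapse true (c :: t) = c :: pvCollapse false t by simp [pvCollapse, hc]]
        have h2 := ih.2 [c] (u ++ ['/']) (by simp [Ne.symm hc])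
          (by simpa using pvGood_append (u ++ ['/']) c hc)
        obtain ⟨q, rest, hq⟩ := pvMySplit_head t [c]
        rw [show u ++ '/' :: c :: pvCollapse false t = (u ++ ['/']) ++ [c] ++ pvCollapse false t by simp]
        rw [h2]
        simp [pvMySplit, hc, hq, pvForm, pvForm2]
    · intro pref u hp hg
      by_cases hc : c = '/'
      · subst hc
        rw [show pvCollapse false ('/' :: t) = '/' :: pvCollapse true t by simp [pvCollapse]]
        rw [show u ++ pref ++ '/' :: pvCollapse true t = (u ++ pref) ++ '/' :: pvCollapse true t by simp]
        rw [ih.1 (u ++ pref) hg]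
        simp [pvMySplit, pvForm, pvForm2]
      · rw [show pvCollapse false (c :: t) = c :: pvCollapse false t by simp [pvCollapse, hc]]
        have h2 := ih.2 (pref ++ [c]) u (by simp [hp, Ne.symm hc])
          (by rw [show u ++ (pref ++ [c]) = (u ++ pref) ++ [c] by simp]; exact pvGood_append _ c hc)
        rw [show u ++ pref ++ c :: pvCollapse false t = u ++ (pref ++ [c]) ++ pvCollapse false t by simp]
        rw [h2]
        simp [pvMySplit, hc]

theorem pvMain (l : List Char) : pvPop (pvCollapse false l) = pvForm (pvMySplit [] l) := by
  simpa using (pvMaster l).2 [] [] (by simp) (by simp)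

theorem pvA_fold (chs : List (List Char)) (init : List Char) :
    chs.foldl (fun basen word => if word ≠ [] then basen ++ ['/'] ++ word else basen) init
      = init ++ pvForm2 chs := by
  have hfun : (fun (basen word : List Char) => if word ≠ [] then basen ++ ['/'] ++ word else basen)
      = fun basen word => basen ++ (if word = [] then [] else '/' :: word) := by
    funext basen word
    by_cases hw : word = [] <;> simp [hw]
  rw [hfun, PySem.List.foldl_append_eq_flatMap]
  rfl

-- ===== VERDICT (by name: the statement is the Claim_ definition above) =====
theorem ParseCleanDirName_spec : Claim_equal_ParseCleanDirName := by
  intro bname _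
  unfold Spec_ParseCleanDirName ParseCleanDirName ParseCleanDirName_alt
  dsimp only
  rw [pvFoldl_collapse, List.nil_append, pvMain, pvSplitOn_eq]
  by_cases h1 : (pvMySplit [] bname.toList).length = 1
  · rw [if_pos (by simpa using h1), pvMySplit_len1 _ [] h1]
    simp only [pvForm, pvForm2, List.headD, List.tail, List.flatMap_nil, List.append_nil]
    exact String.ofList_toList.symm
  · rw [if_neg (by simpa using h1), pvA_fold]
    rfl
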